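-- pv_equiv track=rewrite | github.com/germanrud/python-algo-1 | practica8.py | separar_palabra_clase
-- ===== SOURCE A (Python) =====
-- def separar_palabra_clase(linea:str) -> list[str]: #version clase asuminedo que no hay espacios al princ y al final
--     res:list[str] = [] #hay que arreglarla esta
--     palabra:str = ""
--     for letra in linea:
--         if letra != " ":
--             palabra = palabra + letra
--         else:
--             res.append(palabra)
--             palabra = ""
--     return res
-- ===== SOURCE B (Python) =====
-- def separar_palabra_clase(linea: str) -> list[str]:
--     # Delegate segmentation to str.split on the space separator; A never
--     # flushes the final word, which is exactly the trailing slice.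
--     return linea.split(" ")[:-1]
-- ===== Notes on version B (the rewrite author's own statement) =====
-- stated objective: idiomatic
-- what changed: Replaces the manual character-accumulation loop (concatenating letters one by one and flushing on each separator) with library segmentation via str.split followed by a slice dropping the last element, matching the never-flushed final word.
import Mathlib
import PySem

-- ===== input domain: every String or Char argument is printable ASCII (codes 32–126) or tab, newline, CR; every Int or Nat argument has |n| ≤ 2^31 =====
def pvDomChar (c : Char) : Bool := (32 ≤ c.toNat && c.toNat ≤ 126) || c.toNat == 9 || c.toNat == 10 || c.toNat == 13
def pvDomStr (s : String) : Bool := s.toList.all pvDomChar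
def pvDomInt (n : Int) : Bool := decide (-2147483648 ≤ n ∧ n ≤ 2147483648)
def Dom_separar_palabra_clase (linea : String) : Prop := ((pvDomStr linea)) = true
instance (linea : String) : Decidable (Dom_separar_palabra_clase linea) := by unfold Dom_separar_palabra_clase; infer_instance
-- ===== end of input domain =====

-- B replaces A's manual character-accumulation loop with split(" ") plus a [:-1] slice (idiomatic; same return value).

-- ===== PORT A =====
-- for letra in linea: accumulate into palabra, flush to res on ' '; the last palabra is never flushed.
def sepGoA : List Char → List String → String → List String
  | [], res, _ => res
  | letra :: rest, res, palabra =>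
      if letra ≠ ' ' then sepGoA rest res (palabra.push letra)
      else sepGoA rest (res ++ [palabra]) ""

def separar_palabra_clase (linea : String) : List String :=
  sepGoA linea.toList [] ""

-- ===== PORT B =====
-- linea.split(" ")[:-1]
def separar_palabra_clase_alt (linea : String) : List String :=
  PySem.List.slice ((PySem.Chars.splitOn linea.toList [' ']).map String.ofList) none (some (-1))

-- ===== PRECONDITION & SPEC =====
def Spec_separar_palabra_clase (linea : String) (out : List String) : Prop := out = separar_palabra_clase_alt linea
instance (linea : String) (out : List String) : Decidable (Spec_separar_palabra_clase linea out) := by unfold Spec_separar_palabra_clase; infer_instance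

-- ===== CLAIM (what is proved, stated in full; the proofs are below) =====
def Claim_equal_separar_palabra_clase : Prop := ∀ (linea : String), Dom_separar_palabra_clase linea → Spec_separar_palabra_clase linea (separar_palabra_clase linea)

-- ===== LEMMAS AND PROOFS =====

-- Reference splitter: words of (cur.reverse ++ l) split on ' ', all pieces kept.
def mySplit (cur : List Char) : List Char → List (List Char)
  | [] => [cur.reverse]
  | c :: rest => if c = ' ' then cur.reverse :: mySplit [] rest else mySplit (c :: cur) rest

theorem mySplit_ne_nil (cur l : List Char) : mySplit cur l ≠ [] := by
  induction l generalizing cur with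
  | nil => simp [mySplit]
  | cons c rest ih => by_cases h : c = ' ' <;> simp [mySplit, h, ih]

theorem splitOn_go_eq (fuel : Nat) : ∀ (l cur : List Char) (accs : List (List Char)),
    l.length < fuel →
    PySem.Chars.splitOn.go [' '] fuel l cur accs = accs.reverse ++ mySplit cur l := by
  induction fuel with
  | zero => intro l _ _ h; omega
  | succ n ih =>
    intro l cur accs h
    cases l with
    | nil => simp [PySem.Chars.splitOn.go, mySplit]
    | cons c rest =>
      rw [PySem.Chars.splitOn.go]
      by_cases hc : c = ' '
      · subst hc
        have hp : ([' '].isPrefixOf (' ' :: rest)) = true := by simp [List.isPrefixOf]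
        simp only [hp, if_true, List.length_singleton, List.drop_succ_cons, List.drop_zero]
        rw [ih rest [] _ (by simp at h; omega)]
        simp [mySplit]
      · have hp : ([' '].isPrefixOf (c :: rest)) = false := by
          simp [List.isPrefixOf]; exact fun hh => hc hh.symm
        simp only [hp, Bool.false_eq_true, if_false]
        rw [ih rest (c :: cur) accs (by simp at h ⊢; omega)]
        simp [mySplit, hc]

theorem splitOn_eq (s : List Char) : PySem.Chars.splitOn s [' '] = mySplit [] s := by
  have := splitOn_go_eq (s.length + 1) s [] [] (by omega)
  simpa [PySem.Chars.splitOn] using this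

theorem sepGoA_eq (cs : List Char) : ∀ (res : List String) (pal : String),
    sepGoA cs res pal = res ++ ((mySplit pal.toList.reverse cs).dropLast).map String.ofList := by
  induction cs with
  | nil => intro res pal; simp [sepGoA, mySplit]
  | cons c rest ih =>
    intro res pal
    by_cases hc : c = ' '
    · subst hc
      simp only [sepGoA, ne_eq, not_true_eq_false, if_false]
      rw [ih]
      have hne := mySplit_ne_nil ([] : List Char) rest
      simp [mySplit, List.dropLast_cons_of_ne_nil hne]
    · simp only [sepGoA, ne_eq, hc, not_false_eq_true, if_true]
      rw [ih]
      have hp : (pal.push c).toList = pal.toList ++ [c] := by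
        simp [String.toList_push]
      simp [mySplit, hc, hp]

-- ===== VERDICT (by name: the statement is the Claim_ definition above) =====
theorem separar_palabra_clase_spec : Claim_equal_separar_palabra_clase := by
  intro linea _
  unfold Spec_separar_palabra_clase separar_palabra_clase separar_palabra_clase_alt
  rw [sepGoA_eq, splitOn_eq, PySem.List.slice_to_neg_one]
  simp
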